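-- pv_equiv track=rewrite | github.com/Devops-orchestra/DevOps-Orchestra | agents/infrastructure_agent/tools/llm_infra_generator.py | split_tf_files
-- ===== SOURCE A (Python) =====
-- def split_tf_files(clean_response: str) -> dict:
--     files = {}
--     current_file = None
--     current_lines = []
--
--     for line in clean_response.splitlines():
--         stripped = line.strip().lower()
--         if stripped in {"provider.tf", "main.tf", "variables.tf", "outputs.tf"}:
--             if current_file and current_lines:
--                 files[current_file] = "\n".join(current_lines).strip()
--             current_file = stripped
--             current_lines = []
--         elif current_file:
--             current_lines.append(line)
--
--     if current_file and current_lines: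
--         files[current_file] = "\n".join(current_lines).strip()
--
--     if not files:
--         files["main.tf"] = clean_response.strip()
--
--     return files
-- ===== SOURCE B (Python) =====
-- _HEADERS = {"provider.tf", "main.tf", "variables.tf", "outputs.tf"}
--
-- def split_tf_files(clean_response: str) -> dict:
--     # Back-to-front scan: build the complete list of (header, content-lines) segments
--     # (content collected in reverse), then a second pass inserts non-empty segments.
--     segments = []
--     tail = []  # lines below the current position, up to the next header (reversed)
--     for line in reversed(clean_response.splitlines()):
--         name = line.strip().lower()
--         if name in _HEADERS:
--             segments.append((name, tail))
--             tail = []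
--         else:
--             tail.append(line)
--     files = {}
--     for name, content in reversed(segments):
--         if content:
--             files[name] = "\n".join(reversed(content)).strip()
--     if not files:
--         files["main.tf"] = clean_response.strip()
--     return files
-- ===== Notes on version B (the rewrite author's own statement) =====
-- stated objective: alternative
-- what changed: B replaces A's single stateful scan (current-file/current-lines with flush-on-header and flush-at-end) by a reverse traversal that builds the complete (header, content-lines) segment list back-to-front and a second pass that inserts the non-empty segments into the dict in order.
import Mathlib
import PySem

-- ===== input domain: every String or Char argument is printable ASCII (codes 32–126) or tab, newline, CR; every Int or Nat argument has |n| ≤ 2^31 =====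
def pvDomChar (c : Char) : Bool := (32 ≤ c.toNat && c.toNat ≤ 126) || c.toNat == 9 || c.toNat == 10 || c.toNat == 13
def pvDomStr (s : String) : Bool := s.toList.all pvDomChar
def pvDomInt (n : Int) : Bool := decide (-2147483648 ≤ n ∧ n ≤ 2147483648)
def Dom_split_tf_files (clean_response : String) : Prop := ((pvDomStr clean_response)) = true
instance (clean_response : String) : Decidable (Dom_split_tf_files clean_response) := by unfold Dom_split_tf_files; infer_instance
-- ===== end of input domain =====

-- B changes the decomposition: A keeps current-file/current-lines state and flushes into the dict
-- as it scans; B scans the lines in reverse, building the full (header, content) segment list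
-- back-to-front, then inserts the non-empty segments in a second pass (objective: alternative).

-- ===== PORT A =====
-- the Python set literal {"provider.tf", "main.tf", "variables.tf", "outputs.tf"} membership test (module constant, shared by both ports)
def splitHdr (s : String) : Bool :=
  s == "provider.tf" || s == "main.tf" || s == "variables.tf" || s == "outputs.tf"

-- the final 'if not files: files["main.tf"] = ...; return files' lines, identical in both Pythons
def splitFinish (clean_response : String) (files : PySem.Dict String String) : List (String × String) :=
  (if files.items.isEmpty then files.insert "main.tf" (PySem.Str.strip clean_response) else files).items

-- loop body of A
def splitStepA (st : PySem.Dict String String × Option String × List String) (line : String) :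
    PySem.Dict String String × Option String × List String :=
  match st with
  | (files, current_file, current_lines) =>
    let stripped := PySem.Str.lower (PySem.Str.strip line)
    if splitHdr stripped then
      let files' :=
        match current_file with
        | some f =>
            if current_lines.isEmpty then files
            else files.insert f (PySem.Str.strip (PySem.Str.join "\n" current_lines))
        | none => files
      (files', some stripped, ([] : List String))
    else
      match current_file with
      | some _ => (files, current_file, current_lines ++ [line])
      | none => (files, current_file, current_lines)

-- the post-loop 'if current_file and current_lines' flush
def splitFlushA (files : PySem.Dict String String) (current_file : Option String)
    (current_lines : List String) : PySem.Dict String String :=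
  match current_file with
  | some f =>
      if current_lines.isEmpty then files
      else files.insert f (PySem.Str.strip (PySem.Str.join "\n" current_lines))
  | none => files

def split_tf_files (clean_response : String) : List (String × String) :=
  let r := (PySem.Str.splitlines clean_response).foldl splitStepA (PySem.Dict.empty, none, [])
  splitFinish clean_response (splitFlushA r.1 r.2.1 r.2.2)

-- ===== PORT B =====
-- loop body of B's reverse scan (state: segments built so far, reversed tail of pending lines)
def splitStepB (st : List (String × List String) × List String) (line : String) :
    List (String × List String) × List String :=
  match st with
  | (segments, tail) =>
    let name := PySem.Str.lower (PySem.Str.strip line)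
    if splitHdr name then (segments ++ [(name, tail)], ([] : List String))
    else (segments, tail ++ [line])

-- body of B's second pass over reversed(segments)
def splitInsB (files : PySem.Dict String String) (seg : String × List String) :
    PySem.Dict String String :=
  if seg.2.isEmpty then files
  else files.insert seg.1 (PySem.Str.strip (PySem.Str.join "\n" seg.2.reverse))

def split_tf_files_alt (clean_response : String) : List (String × String) :=
  let p := (PySem.Str.splitlines clean_response).reverse.foldl splitStepB ([], [])
  splitFinish clean_response (p.1.reverse.foldl splitInsB PySem.Dict.empty)

-- ===== PRECONDITION & SPEC =====
def Spec_split_tf_files (clean_response : String) (out : List (String × String)) : Prop := out = split_tf_files_alt clean_response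
instance (clean_response : String) (out : List (String × String)) : Decidable (Spec_split_tf_files clean_response out) := by unfold Spec_split_tf_files; infer_instance

-- ===== CLAIM (what is proved, stated in full; the proofs are below) =====
def Claim_equal_split_tf_files : Prop := ∀ (clean_response : String), Dom_split_tf_files clean_response → Spec_split_tf_files clean_response (split_tf_files clean_response)

-- ===== LEMMAS AND PROOFS =====

-- common segmentation spec: the (header, content-lines) segments in forward order
def pvNorm (l : String) : String := PySem.Str.lower (PySem.Str.strip l)

def pvIns (files : PySem.Dict String String) (seg : String × List String) :
    PySem.Dict String String :=
  if seg.2.isEmpty then files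
  else files.insert seg.1 (PySem.Str.strip (PySem.Str.join "\n" seg.2))

def pvSegsFrom (name : String) (acc : List String) : List String → List (String × List String)
  | [] => [(name, acc)]
  | l :: ls =>
      if splitHdr (pvNorm l) then (name, acc) :: pvSegsFrom (pvNorm l) [] ls
      else pvSegsFrom name (acc ++ [l]) ls

def pvSegs : List String → List (String × List String)
  | [] => []
  | l :: ls => if splitHdr (pvNorm l) then pvSegsFrom (pvNorm l) [] ls else pvSegs ls

theorem pvSegsFrom_eq (L : List String) : ∀ (name : String) (acc : List String),
    pvSegsFrom name acc L =
      (name, acc ++ L.takeWhile (fun l => !splitHdr (pvNorm l))) :: pvSegs L := by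
  induction L with
  | nil => intro name acc; simp [pvSegsFrom, pvSegs]
  | cons l ls ih =>
      intro name acc
      by_cases h : splitHdr (pvNorm l) = true
      · simp [pvSegsFrom, pvSegs, h, List.takeWhile]
      · simp only [Bool.not_eq_true] at h
        simp [pvSegsFrom, pvSegs, h, List.takeWhile, ih]

theorem stepA_eq (L : List String) : ∀ (name : String) (acc : List String)
    (files : PySem.Dict String String),
    splitFlushA (L.foldl splitStepA (files, some name, acc)).1
        (L.foldl splitStepA (files, some name, acc)).2.1
        (L.foldl splitStepA (files, some name, acc)).2.2 =
      (pvSegsFrom name acc L).foldl pvIns files := by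
  induction L with
  | nil => intro name acc files; simp [splitFlushA, pvSegsFrom, pvIns]
  | cons l ls ih =>
      intro name acc files
      by_cases h : splitHdr (pvNorm l) = true
      · simp only [pvNorm] at h
        simp only [List.foldl_cons, splitStepA, h, if_true]
        rw [ih]
        simp [pvSegsFrom, pvNorm, h, pvIns]
      · simp only [pvNorm, Bool.not_eq_true] at h
        simp only [List.foldl_cons, splitStepA, h, Bool.false_eq_true, if_false]
        rw [ih]
        simp [pvSegsFrom, pvNorm, h]

theorem stepA_none_eq (L : List String) : ∀ (files : PySem.Dict String String),
    splitFlushA (L.foldl splitStepA (files, none, [])).1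
        (L.foldl splitStepA (files, none, [])).2.1
        (L.foldl splitStepA (files, none, [])).2.2 =
      (pvSegs L).foldl pvIns files := by
  induction L with
  | nil => intro files; simp [splitFlushA, pvSegs]
  | cons l ls ih =>
      intro files
      by_cases h : splitHdr (pvNorm l) = true
      · simp only [pvNorm] at h
        simp only [List.foldl_cons, splitStepA, h, if_true]
        rw [stepA_eq]
        simp [pvSegs, pvNorm, h]
      · simp only [pvNorm, Bool.not_eq_true] at h
        simp only [List.foldl_cons, splitStepA, h, Bool.false_eq_true, if_false]
        rw [ih]
        simp [pvSegs, pvNorm, h]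

theorem stepB_eq (L : List String) :
    ((L.foldr (fun x st => splitStepB st x) ([], [])).1.reverse.map
        (fun s => (s.1, s.2.reverse)) = pvSegs L) ∧
    ((L.foldr (fun x st => splitStepB st x) ([], [])).2.reverse =
        L.takeWhile (fun l => !splitHdr (pvNorm l))) := by
  induction L with
  | nil => simp [pvSegs]
  | cons l ls ih =>
      obtain ⟨ih1, ih2⟩ := ih
      simp only [List.foldr_cons]
      generalize hq : (ls.foldr (fun x st => splitStepB st x) ([], [])) = q at ih1 ih2
      obtain ⟨segs, tl⟩ := q
      by_cases h : splitHdr (pvNorm l) = true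
      · simp only [pvNorm] at h
        simp only [splitStepB, h, if_true]
        constructor
        · simp only [List.reverse_append, List.map_append, List.reverse_cons] at *
          simp [ih1, ih2, pvSegs, pvNorm, h, pvSegsFrom_eq]
        · simp [List.takeWhile, pvNorm, h]
      · simp only [pvNorm, Bool.not_eq_true] at h
        simp only [splitStepB, h, Bool.false_eq_true, if_false]
        constructor
        · simpa [pvSegs, pvNorm, h] using ih1
        · simp [ih2, List.takeWhile, pvNorm, h]

theorem insB_map (segs : List (String × List String)) : ∀ (files : PySem.Dict String String),
    (segs.map (fun s => (s.1, s.2.reverse))).foldl pvIns files = segs.foldl splitInsB files := by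
  induction segs with
  | nil => intro files; simp
  | cons s ss ih =>
      intro files
      simp only [List.map_cons, List.foldl_cons, ih]
      congr 1
      simp [pvIns, splitInsB]

-- ===== VERDICT (by name: the statement is the Claim_ definition above) =====
theorem split_tf_files_spec : Claim_equal_split_tf_files := by
  intro c _
  show split_tf_files c = split_tf_files_alt c
  show splitFinish c
      (splitFlushA ((PySem.Str.splitlines c).foldl splitStepA (PySem.Dict.empty, none, [])).1
        ((PySem.Str.splitlines c).foldl splitStepA (PySem.Dict.empty, none, [])).2.1
        ((PySem.Str.splitlines c).foldl splitStepA (PySem.Dict.empty, none, [])).2.2) =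
    splitFinish c
      (((PySem.Str.splitlines c).reverse.foldl splitStepB ([], [])).1.reverse.foldl splitInsB
        PySem.Dict.empty)
  have hB : (PySem.Str.splitlines c).reverse.foldl splitStepB ([], [])
      = (PySem.Str.splitlines c).foldr (fun x st => splitStepB st x) ([], []) := by
    rw [List.foldl_reverse]
  rw [stepA_none_eq, hB, ← (stepB_eq (PySem.Str.splitlines c)).1, insB_map]
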